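-- pv_equiv track=rewrite | github.com/elianetamara/treinos-python | exercicios/obfuscation.py | obfusca
-- ===== SOURCE A (Python) =====
-- def is_space(carac):
--     if carac == ' ':
--         return True
--     return False
--
-- def space_ast(codigo, indice):
--     palavra = ''
--     retorno = ''
--     for i in range(len(codigo)):
--         if i == indice:
--             retorno += len(palavra) * '*'
--         if codigo[i].isalpha():
--             palavra += codigo[i]
--         elif is_space(codigo[i]):
--             palavra = ''
--     return retorno
--
-- def is_carac(carac):
--     caracteres = ['a', 'b', 'e', 'g', 'i', 'l', 's', 'o']
--     for i in caracteres:
--         if carac.lower() == i: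
--             return True
--     return False
--
-- def is_num(carac):
--     numeros = [4,8, 3, 6, 1, 7, 5, 0]
--     for i in numeros:
--         if carac.isdigit():
--             if int(carac.lower()) == i:
--                 return True
--     return False
--
-- def carac_num(carac):
--     ret = ''
--     caracteres = ['a', 'b', 'e', 'g', 'i', 'l', 's', 'o']
--     numeros = [4,8, 3, 6, 1, 7, 5, 0]
--     for i in range(len(caracteres)):
--         if carac.lower() == caracteres[i]:
--             ret += str(numeros[i])
--     return ret
--
-- def num_carac(carac):
--     ret = ''
--     caracteres = ['a', 'b', 'e', 'g', 'i', 'l', 's', 'o']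
--     numeros = [4,8, 3, 6, 1, 7, 5, 0]
--     for i in range(len(numeros)):
--         if int(carac.lower()) == numeros[i]:
--             ret += caracteres[i]
--     return ret
--
-- def troca(codigo):
--     retorno = ''
--     for i in codigo:
--         if i.islower():
--             retorno += i.upper()
--         else:
--             retorno += i.lower()
--     return retorno
--
-- def obfusca(codigo):
--     codigo = troca(codigo)
--     ret = ''
--     for i in range(len(codigo)):
--         if is_carac(codigo[i]):
--             ret += carac_num(codigo[i])
--         elif is_num(codigo[i]):
--             ret += num_carac(codigo[i])
--         elif is_space(codigo[i]):
--             ret += space_ast(codigo, i)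
--         else:
--             ret += codigo[i]
--     return ret
-- ===== SOURCE B (Python) =====
-- # B: single pass with a running preceding-word-length counter instead of A's per-space rescan (O(n) vs O(n^2)).
-- _MAP = {'a': '4', 'b': '8', 'e': '3', 'g': '6', 'i': '1', 'l': '7', 's': '5', 'o': '0'}
-- _INV = {'4': 'a', '8': 'b', '3': 'e', '6': 'g', '1': 'i', '7': 'l', '5': 's', '0': 'o'}
--
-- def obfusca(codigo):
--     out = []
--     wl = 0  # number of alphabetic chars since the last space
--     for c in codigo:
--         sw = c.upper() if c.islower() else c.lower()
--         lo = sw.lower()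
--         if lo in _MAP:
--             out.append(_MAP[lo])
--         elif sw in _INV:
--             out.append(_INV[sw])
--         elif sw == ' ':
--             out.append('*' * wl)
--         else:
--             out.append(sw)
--         if sw.isalpha():
--             wl += 1
--         elif sw == ' ':
--             wl = 0
--     return ''.join(out)
-- ===== Notes on version B (the rewrite author's own statement) =====
-- stated objective: faster
-- what changed: A re-scans the whole string (space_ast) at every space to recover the preceding word's length, giving O(n^2); B is a single pass that keeps a running count of alphabetic characters since the last space and uses table lookups for the letter/digit swaps, giving O(n).
import Mathlib
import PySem

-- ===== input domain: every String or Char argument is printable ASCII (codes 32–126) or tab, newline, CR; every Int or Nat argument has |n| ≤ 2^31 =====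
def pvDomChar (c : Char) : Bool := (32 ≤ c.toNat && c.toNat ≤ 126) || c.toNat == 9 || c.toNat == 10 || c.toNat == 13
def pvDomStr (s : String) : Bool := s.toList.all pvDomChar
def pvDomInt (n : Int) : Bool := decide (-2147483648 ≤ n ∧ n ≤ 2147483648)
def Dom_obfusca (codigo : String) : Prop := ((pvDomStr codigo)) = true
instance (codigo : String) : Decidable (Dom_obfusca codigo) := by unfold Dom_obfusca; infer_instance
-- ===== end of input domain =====

-- B replaces A's per-space rescan of the whole string with a single pass keeping a
-- running preceding-word-length counter (objective: faster, O(n) instead of O(n^2)).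

-- ===== PORT A =====
def is_space (carac : Char) : Bool :=
  if carac == ' ' then true else false

-- loop body of space_ast (named so the lemmas can talk about one fold step)
def sastStep (indice : Int) (st : List Char × List Char) (ic : Int × Char) :
    List Char × List Char :=
  let retorno := if ic.1 == indice then st.2 ++ List.replicate st.1.length '*' else st.2
  if PySem.Chars.isalpha ic.2 then (st.1 ++ [ic.2], retorno)
  else if is_space ic.2 then (([] : List Char), retorno)
  else (st.1, retorno)

def space_ast (codigo : List Char) (indice : Int) : List Char :=
  ((PySem.List.enumerate codigo).foldl (sastStep indice) ([], [])).2

def is_carac (carac : Char) : Bool :=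
  ['a', 'b', 'e', 'g', 'i', 'l', 's', 'o'].any
    (fun i => PySem.Chars.lowerChar carac == i)

-- int(carac.lower()) is ported as (ofChars? [lowerChar carac]).getD 0; the fallback 0 is
-- unreachable here because the isdigit guard holds whenever the conversion is evaluated.
def is_num (carac : Char) : Bool :=
  ([4, 8, 3, 6, 1, 7, 5, 0] : List Int).any
    (fun i => PySem.Chars.isdigit carac &&
      ((PySem.Int.ofChars? [PySem.Chars.lowerChar carac]).getD 0 == i))

def carac_num (carac : Char) : List Char :=
  (List.zip ['a', 'b', 'e', 'g', 'i', 'l', 's', 'o'] ([4, 8, 3, 6, 1, 7, 5, 0] : List Int)).foldl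
    (fun ret ci =>
      if PySem.Chars.lowerChar carac == ci.1 then ret ++ PySem.Int.toChars ci.2 else ret) []

-- num_carac is only invoked by obfusca under the is_num guard, where int() succeeds;
-- the getD 0 fallback is unreachable there.
def num_carac (carac : Char) : List Char :=
  (List.zip ['a', 'b', 'e', 'g', 'i', 'l', 's', 'o'] ([4, 8, 3, 6, 1, 7, 5, 0] : List Int)).foldl
    (fun ret ci =>
      if (PySem.Int.ofChars? [PySem.Chars.lowerChar carac]).getD 0 == ci.2 then ret ++ [ci.1]
      else ret) []

def troca (codigo : List Char) : List Char :=
  codigo.foldl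
    (fun ret c =>
      ret ++ [if PySem.Chars.islower c then PySem.Chars.upperChar c else PySem.Chars.lowerChar c])
    []

-- loop body of obfusca's main loop over enumerate(codigo)
def mainStepA (cs : List Char) (ret : List Char) (ic : Int × Char) : List Char :=
  if is_carac ic.2 then ret ++ carac_num ic.2
  else if is_num ic.2 then ret ++ num_carac ic.2
  else if is_space ic.2 then ret ++ space_ast cs ic.1
  else ret ++ [ic.2]

def obfusca (codigo : String) : String :=
  let cs := troca codigo.toList
  String.mk ((PySem.List.enumerate cs).foldl (mainStepA cs) [])

-- ===== PORT B =====
def swapcaseChar (c : Char) : Char :=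
  if PySem.Chars.islower c then PySem.Chars.upperChar c else PySem.Chars.lowerChar c

def mapB : PySem.Dict Char Char :=
  ⟨[('a', '4'), ('b', '8'), ('e', '3'), ('g', '6'), ('i', '1'), ('l', '7'), ('s', '5'), ('o', '0')]⟩

def invB : PySem.Dict Char Char :=
  ⟨[('4', 'a'), ('8', 'b'), ('3', 'e'), ('6', 'g'), ('1', 'i'), ('7', 'l'), ('5', 's'), ('0', 'o')]⟩

-- one step of B's single pass: state = (output so far, alpha chars since last space)
def altStep (st : List Char × Nat) (c : Char) : List Char × Nat :=
  let sw := swapcaseChar c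
  let lo := PySem.Chars.lowerChar sw
  let out :=
    match mapB.get? lo with
    | some d => st.1 ++ [d]
    | none =>
      match invB.get? sw with
      | some a => st.1 ++ [a]
      | none => if sw == ' ' then st.1 ++ List.replicate st.2 '*' else st.1 ++ [sw]
  let wl := if PySem.Chars.isalpha sw then st.2 + 1 else if sw == ' ' then 0 else st.2
  (out, wl)

def obfusca_alt (codigo : String) : String :=
  String.mk ((codigo.toList.foldl altStep ([], 0)).1)

-- ===== PRECONDITION & SPEC =====
def Spec_obfusca (codigo : String) (out : String) : Prop := out = obfusca_alt codigo
instance (codigo : String) (out : String) : Decidable (Spec_obfusca codigo out) := by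
  unfold Spec_obfusca; infer_instance

-- ===== CLAIM (what is proved, stated in full; the proofs are below) =====
def Claim_equal_obfusca : Prop := ∀ (codigo : String), Dom_obfusca codigo → Spec_obfusca codigo (obfusca codigo)

-- ===== LEMMAS AND PROOFS =====

-- B's step with the swapcased character already supplied
def altStepSw (st : List Char × Nat) (sw : Char) : List Char × Nat :=
  let lo := PySem.Chars.lowerChar sw
  let out :=
    match mapB.get? lo with
    | some d => st.1 ++ [d]
    | none =>
      match invB.get? sw with
      | some a => st.1 ++ [a]
      | none => if sw == ' ' then st.1 ++ List.replicate st.2 '*' else st.1 ++ [sw]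
  let wl := if PySem.Chars.isalpha sw then st.2 + 1 else if sw == ' ' then 0 else st.2
  (out, wl)

-- the running word ("palavra") accumulated by space_ast over a prefix
def wordA (l : List Char) : List Char :=
  l.foldl (fun pal c => if PySem.Chars.isalpha c then pal ++ [c] else if is_space c then [] else pal) []

lemma troca_eq_map (l : List Char) : troca l = l.map swapcaseChar := by
  simpa [troca, swapcaseChar] using
    PySem.List.foldl_append_singleton_eq_map swapcaseChar l []

lemma digit_cases (c : Char) (h : PySem.Chars.isdigit c = true) :
    c ∈ ['0', '1', '2', '3', '4', '5', '6', '7', '8', '9'] := by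
  simp only [PySem.Chars.isdigit, Bool.and_eq_true, decide_eq_true_eq] at h
  have h48 : 48 ≤ c.toNat := h.1
  have h57 : c.toNat ≤ 57 := h.2
  rw [← Char.ofNat_toNat c]
  generalize c.toNat = n at h48 h57
  interval_cases n <;> decide

lemma wordA_append (l : List Char) (x : Char) :
    wordA (l ++ [x]) =
      if PySem.Chars.isalpha x then wordA l ++ [x] else if is_space x then [] else wordA l := by
  simp [wordA, List.foldl_append]

-- full fold of space_ast when the target index lies beyond the scanned list:
-- nothing is ever emitted, palavra is wordA
lemma sast_full (l : List Char) (ind : Int) (h : (l.length : Int) ≤ ind) :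
    (PySem.List.enumerate l).foldl (sastStep ind) ([], []) = (wordA l, []) := by
  induction l using List.reverseRecOn with
  | nil => simp [PySem.List.enumerate_nil, wordA]
  | append_singleton xs x ih =>
    have hx : (xs.length : Int) ≤ ind := by
      simp at h; omega
    rw [PySem.List.enumerate_append, List.foldl_append, ih hx]
    have hne : ((xs.length : Int) == ind) = false := by
      simp at h ⊢; omega
    simp only [PySem.List.enumerate_cons, PySem.List.enumerate_nil, List.foldl_cons,
      List.foldl_nil, sastStep, zero_add, hne, wordA_append]
    split_ifs <;> simp_all

lemma space_ast_at_end (l : List Char) (x : Char) :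
    space_ast (l ++ [x]) (l.length : Int) = List.replicate (wordA l).length '*' := by
  unfold space_ast
  rw [PySem.List.enumerate_append, List.foldl_append, sast_full l _ le_rfl]
  simp only [PySem.List.enumerate_cons, PySem.List.enumerate_nil, List.foldl_cons,
    List.foldl_nil, sastStep, zero_add, beq_self_eq_true, if_true]
  split_ifs <;> simp

lemma space_ast_stable (l : List Char) (x : Char) (i : Int) (hi : i < (l.length : Int)) :
    space_ast (l ++ [x]) i = space_ast l i := by
  unfold space_ast
  rw [PySem.List.enumerate_append, List.foldl_append]
  have hne : ((l.length : Int) == i) = false := by simp; omega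
  simp only [PySem.List.enumerate_cons, PySem.List.enumerate_nil, List.foldl_cons,
    List.foldl_nil, sastStep, zero_add, hne]
  split_ifs <;> simp_all

-- per-character agreement of the two emission rules (A's space result already
-- rewritten to a replicate of the running word length wl)
lemma emit_eq (x : Char) (R : List Char) (wl : Nat) :
    (if is_carac x then R ++ carac_num x
     else if is_num x then R ++ num_carac x
     else if is_space x then R ++ List.replicate wl '*'
     else R ++ [x]) = (altStepSw (R, wl) x).1 := by
  by_cases hsp : x = ' '
  · subst hsp; rfl
  · by_cases h4 : x = '4'; · subst h4; rfl
    by_cases h8 : x = '8'; · subst h8; rfl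
    by_cases h3 : x = '3'; · subst h3; rfl
    by_cases h6 : x = '6'; · subst h6; rfl
    by_cases h1 : x = '1'; · subst h1; rfl
    by_cases h7 : x = '7'; · subst h7; rfl
    by_cases h5 : x = '5'; · subst h5; rfl
    by_cases h0 : x = '0'; · subst h0; rfl
    by_cases ha : PySem.Chars.lowerChar x = 'a'
    · simp [is_carac, carac_num, altStepSw, mapB, PySem.Dict.get?, ha] <;> decide
    by_cases hb : PySem.Chars.lowerChar x = 'b'
    · simp [is_carac, carac_num, altStepSw, mapB, PySem.Dict.get?, hb] <;> decide
    by_cases he : PySem.Chars.lowerChar x = 'e'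
    · simp [is_carac, carac_num, altStepSw, mapB, PySem.Dict.get?, he] <;> decide
    by_cases hg : PySem.Chars.lowerChar x = 'g'
    · simp [is_carac, carac_num, altStepSw, mapB, PySem.Dict.get?, hg] <;> decide
    by_cases hi : PySem.Chars.lowerChar x = 'i'
    · simp [is_carac, carac_num, altStepSw, mapB, PySem.Dict.get?, hi] <;> decide
    by_cases hl : PySem.Chars.lowerChar x = 'l'
    · simp [is_carac, carac_num, altStepSw, mapB, PySem.Dict.get?, hl] <;> decide
    by_cases hs : PySem.Chars.lowerChar x = 's'
    · simp [is_carac, carac_num, altStepSw, mapB, PySem.Dict.get?, hs] <;> decide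
    by_cases ho : PySem.Chars.lowerChar x = 'o'
    · simp [is_carac, carac_num, altStepSw, mapB, PySem.Dict.get?, ho] <;> decide
    -- x is none of the mapped letters or digits and not a space
    have hic : is_carac x = false := by
      simp [is_carac, ha, hb, he, hg, hi, hl, hs, ho]
    have hinv : invB.get? x = none := by
      have hf : List.find? (fun p => p.1 == x) invB.items = none := by
        rw [List.find?_eq_none]
        intro p hp
        fin_cases hp <;>
          simp [Ne.symm h4, Ne.symm h8, Ne.symm h3, Ne.symm h6, Ne.symm h1, Ne.symm h7,
            Ne.symm h5, Ne.symm h0]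
      simp [PySem.Dict.get?, hf]
    have hmap : mapB.get? (PySem.Chars.lowerChar x) = none := by
      have hf : List.find? (fun p => p.1 == PySem.Chars.lowerChar x) mapB.items = none := by
        rw [List.find?_eq_none]
        intro p hp
        fin_cases hp <;>
          simp [Ne.symm ha, Ne.symm hb, Ne.symm he, Ne.symm hg, Ne.symm hi, Ne.symm hl,
            Ne.symm hs, Ne.symm ho]
      simp [PySem.Dict.get?, hf]
    have hin : is_num x = false := by
      by_cases hd : PySem.Chars.isdigit x
      · have := digit_cases x hd
        simp only [List.mem_cons, List.not_mem_nil, or_false] at this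
        rcases this with h | h | h | h | h | h | h | h | h | h <;> subst h <;>
          first | decide | simp_all
      · simp [is_num, hd]
    simp [hic, hin, is_space, hsp, altStepSw, hmap, hinv]

-- B's single pass computes A's main fold paired with the running word length
lemma main_eq (l : List Char) :
    l.foldl altStepSw ([], 0) =
      ((PySem.List.enumerate l).foldl (mainStepA l) [], (wordA l).length) := by
  induction l using List.reverseRecOn with
  | nil => simp [PySem.List.enumerate_nil, wordA]
  | append_singleton xs x ih =>
    rw [List.foldl_append, ih, PySem.List.enumerate_append, List.foldl_append]
    have hcongr : (PySem.List.enumerate xs).foldl (mainStepA (xs ++ [x])) [] =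
        (PySem.List.enumerate xs).foldl (mainStepA xs) [] := by
      apply PySem.List.foldl_congr_mem
      intro acc ic hmem
      rw [PySem.List.mem_enumerate_iff] at hmem
      obtain ⟨k, hk, rfl⟩ := hmem
      unfold mainStepA
      rw [space_ast_stable xs x _ (by simp; omega)]
    rw [hcongr]
    simp only [List.foldl_cons, List.foldl_nil, PySem.List.enumerate_cons,
      PySem.List.enumerate_nil]
    apply Prod.ext
    · show _ = mainStepA (xs ++ [x]) _ (0 + xs.length, x)
      unfold mainStepA
      simp only [zero_add]
      rw [space_ast_at_end]
      exact (emit_eq x _ _).symm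
    · show (if PySem.Chars.isalpha x then (wordA xs).length + 1
            else if x == ' ' then 0 else (wordA xs).length) = (wordA (xs ++ [x])).length
      rw [wordA_append]
      simp [is_space]
      split_ifs <;> simp_all

-- ===== VERDICT (by name: the statement is the Claim_ definition above) =====
theorem obfusca_spec : Claim_equal_obfusca := by
  intro codigo _
  unfold Spec_obfusca obfusca obfusca_alt
  have hB : codigo.toList.foldl altStep ([], 0) =
      (codigo.toList.map swapcaseChar).foldl altStepSw ([], 0) := by
    rw [List.foldl_map]; rfl
  rw [hB, main_eq, troca_eq_map]
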